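-- pv_equiv track=rewrite | github.com/Revi1337/BaekJoon-Coding-Test | 백준/Gold/3079. 입국심사/입국심사.py | solution
-- ===== SOURCE A (Python) =====
-- def solution(N, M, T):
--     T.sort()
--     left, right = T[0], T[-1] * M + 1
--     while left < right:
--         mid = (left + right) // 2
--         cnt = sum(mid // t for t in T)
--         if cnt >= M:
--             right = mid
--         else:
--             left = mid + 1
--
--     return right
-- ===== SOURCE B (Python) =====
-- def solution(N, M, T):
--     # Return-value equivalence only: unlike A, this does not sort T in place.
--     mult = {}
--     for t in T:
--         mult[t] = mult.get(t, 0) + 1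
--
--     def booths_done(x):
--         return sum(c * (x // t) for t, c in mult.items())
--
--     def locate(base, length):
--         if length <= 0:
--             return base
--         half = length // 2
--         probe = base + half
--         if booths_done(probe) >= M:
--             return locate(base, half)
--         return locate(probe + 1, length - half - 1)
--
--     lo = min(T)
--     return locate(lo, max(T) * M + 1 - lo)
-- ===== Notes on version B (the rewrite author's own statement) =====
-- stated objective: alternative
-- what changed: Replaces A's in-place sort plus two-endpoint [left,right) bisection by a multiplicity dict of distinct booth times built once (so the per-probe count sums over distinct times with their counts instead of rescanning duplicates) and a recursive base+length lower_bound-style search over the offset range, with bounds taken by min/max scans instead of sorting.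
-- intended difference: On inputs with inverted search bounds (min(T) > max(T)*M+1, which needs M <= 0 or negative booth times, never a real instance), A's loop never runs and it returns the artificial bound max(T)*M+1, while B returns min(T), its search's base; the corner is unspecified and B's value is the natural degenerate answer of its search. — e.g. on solution(1, 0, [2]): A returns 1, B returns 2
-- outside the precondition, e.g. on solution(1, -1, [0, 2]): A returns -1, B returns 0
import Mathlib
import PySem

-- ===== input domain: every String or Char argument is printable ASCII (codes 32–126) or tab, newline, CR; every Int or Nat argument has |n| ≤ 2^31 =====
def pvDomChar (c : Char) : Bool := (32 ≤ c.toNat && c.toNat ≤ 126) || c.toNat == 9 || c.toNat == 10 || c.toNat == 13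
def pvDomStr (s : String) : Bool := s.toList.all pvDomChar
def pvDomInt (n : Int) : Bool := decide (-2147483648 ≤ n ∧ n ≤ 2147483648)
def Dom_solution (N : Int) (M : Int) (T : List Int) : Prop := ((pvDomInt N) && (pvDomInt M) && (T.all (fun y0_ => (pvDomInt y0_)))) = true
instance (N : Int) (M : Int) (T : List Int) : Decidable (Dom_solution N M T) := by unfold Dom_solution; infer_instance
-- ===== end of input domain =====

-- B replaces A's sort + two-endpoint bisection by a multiplicity dict built once and a
-- recursive base+length search; return-value equivalence only (A sorts T in place, B does not).

-- ===== PORT A =====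
-- cnt = sum(mid // t for t in T)
def pvCntA (Ts : List Int) (mid : Int) : Int :=
  (Ts.map (fun t => PySem.Int.floordiv mid t)).sum

-- while left < right: mid = (left+right)//2; if cnt >= M: right = mid else left = mid+1
def pvLoopA (Ts : List Int) (M : Int) (left right : Int) : Int :=
  if h : left < right then
    let mid := PySem.Int.floordiv (left + right) 2
    if pvCntA Ts mid ≥ M then pvLoopA Ts M left mid
    else pvLoopA Ts M (mid + 1) right
  else right
termination_by (right - left).toNat
decreasing_by
  · have hm : PySem.Int.floordiv (left + right) 2 = (left + right) / 2 :=
      PySem.Int.floordiv_eq_ediv_of_pos (by norm_num)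
    simp only [hm]; omega
  · have hm : PySem.Int.floordiv (left + right) 2 = (left + right) / 2 :=
      PySem.Int.floordiv_eq_ediv_of_pos (by norm_num)
    simp only [hm]; omega

def solution (N : Int) (M : Int) (T : List Int) : Int :=
  let Ts := PySem.List.sorted T (fun x => x) false    -- T.sort()
  let left := PySem.List.pyGetD Ts 0 0                -- T[0]  (Pre_ excludes the empty list)
  let right := PySem.List.pyGetD Ts (-1) 0 * M + 1    -- T[-1] * M + 1
  pvLoopA Ts M left right

-- ===== PORT B =====
-- mult[t] = mult.get(t, 0) + 1
def pvMult (T : List Int) : PySem.Dict Int Int :=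
  T.foldl (fun d t => d.modify t 0 (· + 1)) PySem.Dict.empty

-- sum(c * (x // t) for t, c in mult.items())
def pvCntB (mult : PySem.Dict Int Int) (x : Int) : Int :=
  (mult.items.map (fun p => p.2 * PySem.Int.floordiv x p.1)).sum

-- def locate(base, length): ...
def pvLocate (mult : PySem.Dict Int Int) (M : Int) (base length : Int) : Int :=
  if h : length ≤ 0 then base
  else
    let half := PySem.Int.floordiv length 2
    let probe := base + half
    if pvCntB mult probe ≥ M then pvLocate mult M base half
    else pvLocate mult M (probe + 1) (length - half - 1)
termination_by length.toNat
decreasing_by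
  · have hm : PySem.Int.floordiv length 2 = length / 2 :=
      PySem.Int.floordiv_eq_ediv_of_pos (by norm_num)
    simp only [hm]; omega
  · have hm : PySem.Int.floordiv length 2 = length / 2 :=
      PySem.Int.floordiv_eq_ediv_of_pos (by norm_num)
    simp only [hm]; omega

def solution_alt (N : Int) (M : Int) (T : List Int) : Int :=
  let mult := pvMult T
  let lo := (PySem.List.min? T (fun x => x)).getD 0     -- min(T)  (Pre_ excludes the empty list)
  pvLocate mult M lo ((PySem.List.max? T (fun x => x)).getD 0 * M + 1 - lo)

-- ===== PRECONDITION & SPEC =====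
-- Pre_ excludes exactly the inputs where the Pythons raise: the empty list (IndexError in A,
-- ValueError in B) and a zero booth time (ZeroDivisionError in both, except in the inverted-bounds
-- corner where A returns the bound unchecked — see claim.json cites).
def Pre_solution (N : Int) (M : Int) (T : List Int) : Prop := T ≠ [] ∧ 0 ∉ T
instance (N : Int) (M : Int) (T : List Int) : Decidable (Pre_solution N M T) := by
  unfold Pre_solution; infer_instance

def pvWitness_solution : Int × Int × List Int := (3, 6, [7, 2, 2])

-- On inputs with inverted search bounds (min(T) > max(T)*M + 1, possible only for M ≤ 0 or negative
-- booth times, never for a real instance), A's loop never runs and it returns the artificial upper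
-- bound max(T)*M + 1, while B returns the search's base min(T); the corner is unspecified and B's
-- value is the natural degenerate answer of its search.
def D_solution (N : Int) (M : Int) (T : List Int) : Prop :=
  ∃ a ∈ T, ∃ b ∈ T, (∀ t ∈ T, a ≤ t) ∧ (∀ t ∈ T, t ≤ b) ∧ b * M + 1 < a
instance (N : Int) (M : Int) (T : List Int) : Decidable (D_solution N M T) := by
  unfold D_solution; infer_instance

def Spec_solution (N : Int) (M : Int) (T : List Int) (out : Int) : Prop :=
  ¬ D_solution N M T → out = solution_alt N M T
instance (N : Int) (M : Int) (T : List Int) (out : Int) : Decidable (Spec_solution N M T out) := by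
  unfold Spec_solution; infer_instance

def pvDiffWitness_solution : Int × Int × List Int := (1, 0, [2])
def pvDiffWitnessOut_solution : Int × Int := (1, 2)

-- ===== CLAIM (what is proved, stated in full; the proofs are below) =====
def Claim_unchanged_solution : Prop := ∀ (N : Int) (M : Int) (T : List Int), Dom_solution N M T → Pre_solution N M T → Spec_solution N M T (solution N M T)
def Claim_changed_solution : Prop := Dom_solution (pvDiffWitness_solution.1) (pvDiffWitness_solution.2.1) (pvDiffWitness_solution.2.2) ∧ Pre_solution (pvDiffWitness_solution.1) (pvDiffWitness_solution.2.1) (pvDiffWitness_solution.2.2) ∧ D_solution (pvDiffWitness_solution.1) (pvDiffWitness_solution.2.1) (pvDiffWitness_solution.2.2) ∧ solution (pvDiffWitness_solution.1) (pvDiffWitness_solution.2.1) (pvDiffWitness_solution.2.2) = pvDiffWitnessOut_solution.1 ∧ solution_alt (pvDiffWitness_solution.1) (pvDiffWitness_solution.2.1) (pvDiffWitness_solution.2.2) = pvDiffWitnessOut_solution.2 ∧ pvDiffWitnessOut_solution.1 ≠ pvDiffWitnessOut_solution.2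
def Claim_exact_solution : Prop := ∀ (N : Int) (M : Int) (T : List Int), Dom_solution N M T → Pre_solution N M T → D_solution N M T → solution N M T ≠ solution_alt N M T

-- ===== LEMMAS AND PROOFS =====

-- D_ said on the input's extremes: it is exactly "inverted bounds"
theorem pvD_iff (N M : Int) (T : List Int) (h : T ≠ []) :
    D_solution N M T ↔
      (PySem.List.max? T (fun x => x)).getD 0 * M + 1 < (PySem.List.min? T (fun x => x)).getD 0 := by
  obtain ⟨mn, hmn⟩ : ∃ m, PySem.List.min? T (fun x => x) = some m := by
    cases hm : PySem.List.min? T (fun x => x) with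
    | none => exact absurd ((PySem.List.min?_eq_none_iff T _).mp hm) h
    | some m => exact ⟨m, rfl⟩
  obtain ⟨mx, hmx⟩ : ∃ m, PySem.List.max? T (fun x => x) = some m := by
    cases hm : PySem.List.max? T (fun x => x) with
    | none => exact absurd ((PySem.List.max?_eq_none_iff T _).mp hm) h
    | some m => exact ⟨m, rfl⟩
  rw [hmn, hmx]
  constructor
  · rintro ⟨a, ha, b, hb, hamin, hbmax, hlt⟩
    have h1 : a ≤ mn := hamin mn (PySem.List.min?_mem hmn)
    have h2 : mn ≤ a := PySem.List.min?_isMin hmn a ha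
    have h3 : mx ≤ b := hbmax mx (PySem.List.max?_mem hmx)
    have h4 : b ≤ mx := PySem.List.max?_isMax hmx b hb
    have hab : a = mn := le_antisymm h1 h2
    have hbb : b = mx := le_antisymm h4 h3
    subst hab hbb
    simpa using hlt
  · intro hlt
    refine ⟨mn, PySem.List.min?_mem hmn, mx, PySem.List.max?_mem hmx,
      fun t ht => PySem.List.min?_isMin hmn t ht,
      fun t ht => PySem.List.max?_isMax hmx t ht, by simpa using hlt⟩

-- B's deduplicated count equals A's per-booth count (on any list, sorted or not).
theorem pvCnt_eq (T : List Int) (x : Int) :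
    pvCntB (pvMult T) x = pvCntA (PySem.List.sorted T (fun x => x) false) x := by
  have hm : pvMult T = PySem.Dict.counter T := rfl
  have hperm : (PySem.List.sorted T (fun x => x) false).Perm T := PySem.List.sorted_perm T _ _
  have hA : pvCntA (PySem.List.sorted T (fun x => x) false) x = pvCntA T x := by
    unfold pvCntA
    exact List.Perm.sum_eq (hperm.map _)
  rw [hA, hm]
  unfold pvCntB pvCntA
  rw [PySem.Dict.items_counter, List.map_map]
  have h3 : (PySem.Set.ofList T).toFinset = T.toFinset := by
    ext a; simp [List.mem_toFinset, PySem.Set.mem_ofList]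
  rw [Finset.sum_list_map_count T (fun t => PySem.Int.floordiv x t)]
  rw [← List.sum_toFinset _ (PySem.Set.nodup_ofList (xs := T)), h3]
  apply Finset.sum_congr rfl
  intro m _
  simp [Function.comp]

-- head of the ascending sort is min(T), last is max(T)
theorem pv_sorted_head (T : List Int) (h : T ≠ []) :
    PySem.List.pyGetD (PySem.List.sorted T (fun x => x) false) 0 0
      = (PySem.List.min? T (fun x => x)).getD 0 := by
  obtain ⟨m, hm⟩ : ∃ m, PySem.List.min? T (fun x => x) = some m := by
    cases hmin : PySem.List.min? T (fun x => x) with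
    | none => exact absurd ((PySem.List.min?_eq_none_iff T _).mp hmin) h
    | some m => exact ⟨m, rfl⟩
  rw [hm]
  cases hs : PySem.List.sorted T (fun x => x) false with
  | nil => exact absurd ((PySem.List.sorted_eq_nil_iff T _ false).mp hs) h
  | cons a t =>
    rw [PySem.List.pyGetD_zero_cons]
    have ha : a ∈ T := by
      have : a ∈ PySem.List.sorted T (fun x => x) false := by rw [hs]; exact List.mem_cons_self
      exact (PySem.List.mem_sorted T _ false a).mp this
    have h1 : a ≤ m := PySem.List.key_head_sorted_le T (fun x => x) hs m (PySem.List.min?_mem hm)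
    have h2 : m ≤ a := PySem.List.min?_isMin hm a ha
    simp; omega

theorem pv_sorted_last (T : List Int) (h : T ≠ []) :
    PySem.List.pyGetD (PySem.List.sorted T (fun x => x) false) (-1) 0
      = (PySem.List.max? T (fun x => x)).getD 0 := by
  obtain ⟨m, hm⟩ : ∃ m, PySem.List.max? T (fun x => x) = some m := by
    cases hmax : PySem.List.max? T (fun x => x) with
    | none => exact absurd ((PySem.List.max?_eq_none_iff T _).mp hmax) h
    | some m => exact ⟨m, rfl⟩
  rw [hm]
  have hsne : PySem.List.sorted T (fun x => x) false ≠ [] := by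
    intro he; exact h ((PySem.List.sorted_eq_nil_iff T _ false).mp he)
  rw [PySem.List.pyGetD_neg_one (h := hsne)]
  have hlast_mem : (PySem.List.sorted T (fun x => x) false).getLast hsne ∈ T :=
    (PySem.List.mem_sorted T _ false _).mp (List.getLast_mem hsne)
  have h1 : (PySem.List.sorted T (fun x => x) false).getLast hsne ≤ m :=
    PySem.List.max?_isMax hm _ hlast_mem
  have h2 : m ≤ (PySem.List.sorted T (fun x => x) false).getLast hsne := by
    have hmem : m ∈ PySem.List.sorted T (fun x => x) false :=
      (PySem.List.mem_sorted T _ false m).mpr (PySem.List.max?_mem hm)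
    obtain ⟨i, hi, hieq⟩ := List.mem_iff_getElem.mp hmem
    have hlen : 0 < (PySem.List.sorted T (fun x => x) false).length :=
      List.length_pos_iff.mpr hsne
    have hmono := PySem.List.sorted_id_getElem_mono T
      (p := i) (q := (PySem.List.sorted T (fun x => x) false).length - 1) (by omega) (by omega)
    rw [List.getLast_eq_getElem, ← hieq]
    exact hmono
  simp; omega

-- the two searches probe the same points: trajectory equality, for any predicate
theorem pvLoop_eq (mult : PySem.Dict Int Int) (Ts : List Int) (M : Int)
    (hc : ∀ x, pvCntB mult x = pvCntA Ts x) :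
    ∀ (n : Nat) (l r : Int), (r - l).toNat = n → l ≤ r →
      pvLoopA Ts M l r = pvLocate mult M l (r - l) := by
  intro n
  induction n using Nat.strong_induction_on with
  | _ n ih =>
    intro l r hn hlr
    have hfd2 : ∀ a : Int, PySem.Int.floordiv a 2 = a / 2 := fun a =>
      PySem.Int.floordiv_eq_ediv_of_pos (by norm_num)
    rw [pvLoopA, pvLocate]
    by_cases hlt : l < r
    · rw [dif_pos hlt, dif_neg (by omega)]
      dsimp only
      have hmid : l + PySem.Int.floordiv (r - l) 2 = PySem.Int.floordiv (l + r) 2 := by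
        rw [hfd2, hfd2]; omega
      have hmb : l ≤ PySem.Int.floordiv (l + r) 2 ∧ PySem.Int.floordiv (l + r) 2 < r := by
        rw [hfd2]; omega
      rw [hc, hmid]
      by_cases hp : pvCntA Ts (PySem.Int.floordiv (l + r) 2) ≥ M
      · rw [if_pos hp, if_pos hp]
        have := ih (PySem.Int.floordiv (l + r) 2 - l).toNat (by omega) l
          (PySem.Int.floordiv (l + r) 2) rfl (by omega)
        rw [this]
        congr 1
        simp only [hfd2]; omega
      · rw [if_neg hp, if_neg hp]
        have := ih (r - (PySem.Int.floordiv (l + r) 2 + 1)).toNat (by omega)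
          (PySem.Int.floordiv (l + r) 2 + 1) r rfl (by omega)
        rw [this]
        congr 1
        all_goals simp only [hfd2]; omega
    · rw [dif_neg hlt, dif_pos (by omega)]
      omega

-- ===== VERDICT (by name: the statement is the Claim_ definition above) =====
theorem solution_spec : Claim_unchanged_solution := by
  intro N M T _ hpre
  unfold Spec_solution
  intro hnd
  obtain ⟨hne, _⟩ := hpre
  unfold solution solution_alt
  dsimp only
  rw [pv_sorted_head T hne, pv_sorted_last T hne]
  have hle : (PySem.List.min? T (fun x => x)).getD 0
      ≤ (PySem.List.max? T (fun x => x)).getD 0 * M + 1 := by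
    by_contra hgt
    exact hnd ((pvD_iff N M T hne).mpr (by omega))
  have := pvLoop_eq (pvMult T) (PySem.List.sorted T (fun x => x) false) M
    (fun x => pvCnt_eq T x)
    ((PySem.List.max? T (fun x => x)).getD 0 * M + 1 - (PySem.List.min? T (fun x => x)).getD 0).toNat
    ((PySem.List.min? T (fun x => x)).getD 0)
    ((PySem.List.max? T (fun x => x)).getD 0 * M + 1) rfl hle
  rw [this]

theorem solution_changed : Claim_changed_solution := by
  unfold Claim_changed_solution
  refine ⟨by decide, by decide, by decide, ?_, ?_, by decide⟩
  · show solution 1 0 [2] = 1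
    unfold solution
    dsimp only
    rw [pvLoopA]
    norm_num [PySem.List.sorted, PySem.List.insertBy, PySem.List.pyGetD, PySem.List.pyIdx?]
  · show solution_alt 1 0 [2] = 2
    unfold solution_alt
    dsimp only
    rw [pvLocate]
    norm_num [PySem.List.min?]

theorem solution_tight : Claim_exact_solution := by
  intro N M T _ hpre hD
  obtain ⟨hne, _⟩ := hpre
  have hgt := (pvD_iff N M T hne).mp hD
  unfold solution solution_alt
  dsimp only
  rw [pv_sorted_head T hne, pv_sorted_last T hne]
  rw [pvLoopA, pvLocate]
  rw [dif_neg (by omega), dif_pos (by omega)]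
  omega
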